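-- pv_equiv track=rewrite | github.com/daniel-reich/turbo-robot | MpaWRHpnu7uK7nYgB_23.py | doubleton
-- ===== SOURCE A (Python) =====
-- def doubleton(n):
--   n, c = n + 1, 0
--   while c < 1:
--     x, y, lst = n, 0, []
--     while x:
--       if x % 10 not in lst:
--         lst += [x % 10]
--         y += 1
--       x //= 10
--     if y == 2:
--       c += 1
--     else:
--       n += 1
--   return n
-- ===== SOURCE B (Python) =====
-- def doubleton(n):
--     # Combinatorial construction: enumerate every number with exactly two
--     # distinct digits and the same digit-count as s = n+1, take the least one
--     # >= s, falling back to the next power of ten (which always qualifies).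
--     s = n + 1
--     width, limit = 1, 10          # limit = 10**width, smallest power of 10 > s
--     while limit <= s:
--         width, limit = width + 1, limit * 10
--     best = limit
--     for a in range(1, 10):
--         for b in range(10):
--             if b != a:
--                 for mask in range(1, 1 << (width - 1)):
--                     v, m = a, mask
--                     for _ in range(width - 1):
--                         v, m = v * 10 + (b if m & 1 else a), m >> 1
--                     if s <= v < best:
--                         best = v
--     return best
-- ===== Notes on version B (the rewrite author's own statement) =====
-- stated objective: alternative
-- what changed: A scans upward from the successor of n testing each integer's distinct-digit count; B instead determines the digit-width of that successor and directly enumerates every number of that width with exactly two distinct digits (leading digit, second digit, bitmask of positions), returning the least such candidate not below it, with the next power of ten as fallback.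
-- outside the precondition, e.g. on doubleton(-2): A does not finish within the time limit, B returns 10
import Mathlib
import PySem

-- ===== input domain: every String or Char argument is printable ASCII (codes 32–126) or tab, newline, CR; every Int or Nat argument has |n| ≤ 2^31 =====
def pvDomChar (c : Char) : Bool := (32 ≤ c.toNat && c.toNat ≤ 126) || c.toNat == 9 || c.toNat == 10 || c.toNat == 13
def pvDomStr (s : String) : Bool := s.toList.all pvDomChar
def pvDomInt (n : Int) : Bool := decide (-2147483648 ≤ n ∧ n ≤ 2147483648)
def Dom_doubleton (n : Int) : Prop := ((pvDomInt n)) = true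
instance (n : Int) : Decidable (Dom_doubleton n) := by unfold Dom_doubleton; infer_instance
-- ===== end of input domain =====

-- B replaces A's one-by-one upward scan by a combinatorial enumeration of all
-- numbers with exactly two distinct digits of the relevant width (a different
-- algorithm whose cost is independent of the gap A has to scan).

-- ===== PORT A =====
-- inner 'while x' loop of A; fuel only makes the recursion total (A's loop
-- runs x.toNat times at most for x ≥ 0; for negative x Python A diverges,
-- excluded by Pre_)
def pvAInner (x y : Int) (lst : List Int) (fuel : Nat) : Int :=
  match fuel with
  | 0 => y
  | fuel + 1 =>
    if x = 0 then y
    else if PySem.Int.mod x 10 ∈ lst then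
      pvAInner (PySem.Int.floordiv x 10) y lst fuel
    else
      pvAInner (PySem.Int.floordiv x 10) (y + 1) (lst ++ [PySem.Int.mod x 10]) fuel

-- outer 'while c < 1' loop of A; fuel only makes the recursion total
def pvAOuter (nv : Int) (fuel : Nat) : Int :=
  match fuel with
  | 0 => nv
  | fuel + 1 =>
    let y := pvAInner nv 0 [] nv.toNat
    if y = 2 then nv else pvAOuter (nv + 1) fuel

def doubleton (n : Int) : Int :=
  pvAOuter (n + 1) (10 * (n + 1) + 11).toNat

-- ===== PORT B =====
-- 'while limit <= s' loop of B (limit = 10**width)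
def pvBWidth (s w limit : Int) (fuel : Nat) : Int × Int :=
  match fuel with
  | 0 => (w, limit)
  | fuel + 1 =>
    if limit ≤ s then pvBWidth s (w + 1) (limit * 10) fuel else (w, limit)

-- 'for _ in range(width-1)' digit-building loop of B
def pvBuild (a b v m : Int) (k : Nat) : Int :=
  match k with
  | 0 => v
  | k + 1 =>
    pvBuild a b (v * 10 + (if PySem.Int.mod m 2 = 1 then b else a))
      (PySem.Int.floordiv m 2) k

def doubleton_alt (n : Int) : Int :=
  let s := n + 1
  let wl := pvBWidth s 1 10 (s.toNat + 1)
  let k := (wl.1 - 1).toNat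
  (PySem.List.pyRange 1 10 1).foldl (fun best a =>
    (PySem.List.pyRange 0 10 1).foldl (fun best b =>
      if b ≠ a then
        (PySem.List.pyRange 1 (2 ^ k) 1).foldl (fun best mask =>
          let v := pvBuild a b a mask k
          if s ≤ v ∧ v < best then v else best) best
      else best) best) wl.2

-- ===== PRECONDITION & SPEC =====
-- Pre_ excludes n ≤ -2: there A's inner loop 'while x: … x //= 10' never
-- terminates on the negative x (Python A diverges, returning nothing).
def Pre_doubleton (n : Int) : Prop := -1 ≤ n
instance (n : Int) : Decidable (Pre_doubleton n) := by unfold Pre_doubleton; infer_instance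
def pvWitness_doubleton : Int := (5)

def Spec_doubleton (n : Int) (out : Int) : Prop := out = doubleton_alt n
instance (n : Int) (out : Int) : Decidable (Spec_doubleton n out) := by unfold Spec_doubleton; infer_instance

-- ===== CLAIM (what is proved, stated in full; the proofs are below) =====
def Claim_equal_doubleton : Prop := ∀ (n : Int), Dom_doubleton n → Pre_doubleton n → Spec_doubleton n (doubleton n)

-- ===== LEMMAS AND PROOFS =====

-- "exactly two distinct decimal digits"
abbrev pvP (m : ℕ) : Prop := (Nat.digits 10 m).toFinset.card = 2

-- ---- A side: the inner loop counts the distinct digits ----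

def pvNews : List ℤ → List ℤ → ℤ
  | [], _ => 0
  | d :: ds, seen => if d ∈ seen then pvNews ds seen else 1 + pvNews ds (seen ++ [d])

lemma pvNews_card (ds : List ℤ) : ∀ seen : List ℤ,
    pvNews ds seen = ((ds.toFinset \ seen.toFinset).card : ℤ) := by
  induction ds with
  | nil => intro seen; simp [pvNews]
  | cons d ds ih =>
    intro seen
    simp only [pvNews, List.toFinset_cons]
    by_cases h : d ∈ seen
    · rw [if_pos h, ih, Finset.insert_sdiff_of_mem _ (List.mem_toFinset.2 h)]
    · rw [if_neg h, ih]
      have h1 : (seen ++ [d]).toFinset = insert d seen.toFinset := by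
        ext x; simp
      have h2 : insert d ds.toFinset \ seen.toFinset
          = insert d (ds.toFinset \ insert d seen.toFinset) := by
        ext x
        by_cases hx : x = d
        · subst hx; simp [h]
        · simp [hx]
      rw [h1, h2, Finset.card_insert_of_notMem (by simp)]
      push_cast; ring

lemma pvAInner_eq (x : ℕ) : ∀ fuel : ℕ, x ≤ fuel → ∀ (y : ℤ) (lst : List ℤ),
    pvAInner (x : ℤ) y lst fuel
      = y + pvNews ((Nat.digits 10 x).map (Nat.cast : ℕ → ℤ)) lst := by
  induction x using Nat.strong_induction_on with
  | _ x ih =>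
    intro fuel hf y lst
    cases fuel with
    | zero =>
      have hx : x = 0 := Nat.le_zero.mp hf
      subst hx; simp [pvAInner, pvNews]
    | succ fuel =>
      by_cases hx : x = 0
      · subst hx; simp [pvAInner, pvNews]
      · have hx' : ((x : ℤ)) ≠ 0 := by exact_mod_cast hx
        have hmod : PySem.Int.mod (x : ℤ) 10 = ((x % 10 : ℕ) : ℤ) := by
          rw [PySem.Int.mod_eq_emod_of_pos (by norm_num)]; omega
        have hdiv : PySem.Int.floordiv (x : ℤ) 10 = ((x / 10 : ℕ) : ℤ) := by
          rw [PySem.Int.floordiv_eq_ediv_of_pos (by norm_num)]; omega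
        have hdig : Nat.digits 10 x = x % 10 :: Nat.digits 10 (x / 10) :=
          Nat.digits_def' (by norm_num) (Nat.pos_of_ne_zero hx)
        have hlt : x / 10 < x := Nat.div_lt_self (Nat.pos_of_ne_zero hx) (by norm_num)
        have hf' : x / 10 ≤ fuel := by omega
        simp only [pvAInner, if_neg hx', hmod, hdiv, hdig, List.map_cons, pvNews]
        by_cases hm : ((x % 10 : ℕ) : ℤ) ∈ lst
        · rw [if_pos hm, if_pos hm, ih _ hlt fuel hf']
        · rw [if_neg hm, if_neg hm, ih _ hlt fuel hf']; ring

lemma pvAInner_card (x : ℕ) :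
    pvAInner (x : ℤ) 0 [] x = ((Nat.digits 10 x).toFinset.card : ℤ) := by
  rw [pvAInner_eq x x le_rfl 0 [], pvNews_card]
  have himg : ((Nat.digits 10 x).map (Nat.cast : ℕ → ℤ)).toFinset
      = (Nat.digits 10 x).toFinset.image (Nat.cast : ℕ → ℤ) := by
    ext z; simp
  simp only [List.toFinset_nil, Finset.sdiff_empty, himg, zero_add]
  rw [Finset.card_image_of_injective _ Nat.cast_injective]

lemma pvAOuter_eq : ∀ (fuel : ℕ) (nv : ℤ) (m0 : ℕ), 0 ≤ nv → nv.toNat ≤ m0 → pvP m0 →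
    (∀ t : ℕ, nv.toNat ≤ t → t < m0 → ¬ pvP t) → m0 - nv.toNat < fuel →
    pvAOuter nv fuel = (m0 : ℤ) := by
  intro fuel
  induction fuel with
  | zero => intro nv m0 _ _ _ _ h; omega
  | succ fuel ih =>
    intro nv m0 h0 hle hP hmin hf
    have hnv : ((nv.toNat : ℤ)) = nv := Int.toNat_of_nonneg h0
    have hcard : pvAInner nv 0 [] nv.toNat = ((Nat.digits 10 nv.toNat).toFinset.card : ℤ) := by
      conv_lhs => rw [← hnv]
      exact pvAInner_card nv.toNat
    simp only [pvAOuter]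
    by_cases hy : pvP nv.toNat
    · have h2 : pvAInner nv 0 [] nv.toNat = 2 := by
        rw [hcard]; exact_mod_cast hy
      rw [if_pos h2]
      have hm : m0 = nv.toNat := by
        by_contra hne
        exact hmin nv.toNat le_rfl (by omega) hy
      rw [hm, hnv]
    · have h2 : ¬ (pvAInner nv 0 [] nv.toNat = 2) := by
        rw [hcard]
        intro hc
        exact hy (by exact_mod_cast hc)
      rw [if_neg h2]
      have hne : nv.toNat ≠ m0 := fun h => hy (h ▸ hP)
      refine ih (nv + 1) m0 (by omega) (by omega) hP ?_ (by omega)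
      intro t ht1 ht2
      exact hmin t (by omega) ht2

-- ---- digit facts ----

lemma digits_single (a : ℕ) (h1 : 1 ≤ a) (h9 : a ≤ 9) : Nat.digits 10 a = [a] := by
  rw [Nat.digits_def' (by norm_num : (1:ℕ) < 10) (by omega),
    Nat.mod_eq_of_lt (by omega), Nat.div_eq_of_lt (by omega)]
  simp

lemma digits_pow10 (w : ℕ) :
    Nat.digits 10 (10 ^ (w + 1)) = List.replicate (w + 1) 0 ++ [1] := by
  induction w with
  | zero =>
    have h1 : Nat.digits 10 1 = [1] := digits_single 1 (by norm_num) (by norm_num)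
    rw [pow_one, Nat.digits_def' (by norm_num : (1:ℕ) < 10) (by norm_num : 0 < 10)]
    norm_num [h1]
  | succ w ih =>
    have hpos : 0 < 10 ^ (w + 2) := by positivity
    rw [Nat.digits_def' (by norm_num : (1:ℕ) < 10) hpos]
    have he : 10 ^ (w + 2) = 10 ^ (w + 1) * 10 := by ring
    have h1 : 10 ^ (w + 2) % 10 = 0 := by omega
    have h2 : 10 ^ (w + 2) / 10 = 10 ^ (w + 1) := by omega
    rw [h1, h2, ih]
    rfl

lemma pvP_pow10 (w : ℕ) (hw : 1 ≤ w) : pvP (10 ^ w) := by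
  obtain ⟨w', rfl⟩ : ∃ w', w = w' + 1 := ⟨w - 1, by omega⟩
  unfold pvP
  rw [digits_pow10]
  have hset : (List.replicate (w' + 1) 0 ++ [1]).toFinset = ({0, 1} : Finset ℕ) := by
    ext x
    simp [List.mem_replicate]
    tauto
  rw [hset]
  decide

lemma pvP_small (t : ℕ) (h : t < 10) : ¬ pvP t := by
  unfold pvP
  rcases Nat.eq_zero_or_pos t with h0 | hpos
  · subst h0; simp
  · rw [Nat.digits_def' (by norm_num : (1:ℕ) < 10) hpos,
      Nat.mod_eq_of_lt h, Nat.div_eq_of_lt h]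
    simp

-- ---- B side: the width loop finds the least power of ten above s ----

lemma pvBWidth_char : ∀ (fuel : ℕ) (s w : ℤ), 1 ≤ w → s < 10 ^ (w.toNat + fuel) →
    ∃ W : ℤ, pvBWidth s w (10 ^ w.toNat) fuel = (W, 10 ^ W.toNat) ∧ 1 ≤ W ∧
      s < 10 ^ W.toNat ∧ (W = w ∨ 10 ^ (W.toNat - 1) ≤ s) := by
  intro fuel
  induction fuel with
  | zero =>
    intro s w hw hs
    exact ⟨w, rfl, hw, by simpa using hs, Or.inl rfl⟩
  | succ fuel ih =>
    intro s w hw hs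
    simp only [pvBWidth]
    by_cases h : 10 ^ w.toNat ≤ s
    · rw [if_pos h]
      have hwt : (w + 1).toNat = w.toNat + 1 := by omega
      have h10 : (10:ℤ) ^ w.toNat * 10 = 10 ^ (w + 1).toNat := by
        rw [hwt, pow_succ]
      have hs' : s < 10 ^ ((w + 1).toNat + fuel) := by
        have e : (w + 1).toNat + fuel = w.toNat + (fuel + 1) := by omega
        rw [e]; exact hs
      obtain ⟨W, h1, h2, h3, h4⟩ := ih s (w + 1) (by omega) hs'
      rw [h10]
      refine ⟨W, h1, h2, h3, Or.inr ?_⟩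
      rcases h4 with rfl | h4
      · have e : (w + 1).toNat - 1 = w.toNat := by omega
        rw [e]; exact h
      · exact h4
    · rw [if_neg h]
      push_neg at h
      exact ⟨w, rfl, hw, h, Or.inl rfl⟩

-- ---- B side: what pvBuild builds, digit by digit ----

def pvChoose (a b : ℤ) : ℤ → ℕ → List ℕ
  | _, 0 => []
  | m, k + 1 =>
    pvChoose a b (PySem.Int.floordiv m 2) k
      ++ [(if PySem.Int.mod m 2 = 1 then b else a).toNat]

lemma pvBuild_digits : ∀ (k : ℕ) (v m a b : ℤ), 1 ≤ v → 0 ≤ m →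
    0 ≤ a → a ≤ 9 → 0 ≤ b → b ≤ 9 →
    1 ≤ pvBuild a b v m k ∧
      Nat.digits 10 (pvBuild a b v m k).toNat = pvChoose a b m k ++ Nat.digits 10 v.toNat := by
  intro k
  induction k with
  | zero => intro v m a b hv hm _ _ _ _; simp [pvBuild, pvChoose, hv]
  | succ k ih =>
    intro v m a b hv hm ha ha9 hb hb9
    set d : ℤ := if PySem.Int.mod m 2 = 1 then b else a with hd
    have hd0 : 0 ≤ d := by rw [hd]; split_ifs <;> assumption
    have hd9 : d ≤ 9 := by rw [hd]; split_ifs <;> assumption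
    have hv' : 1 ≤ v * 10 + d := by nlinarith
    have hm' : 0 ≤ PySem.Int.floordiv m 2 := by
      rw [PySem.Int.floordiv_eq_ediv_of_pos (by norm_num)]; omega
    obtain ⟨hge, hdig⟩ := ih (v * 10 + d) (PySem.Int.floordiv m 2) a b hv' hm' ha ha9 hb hb9
    have hstep : pvBuild a b v m (k + 1)
        = pvBuild a b (v * 10 + d) (PySem.Int.floordiv m 2) k := by
      simp only [pvBuild]
      rw [← hd]
    have htn : (v * 10 + d).toNat = v.toNat * 10 + d.toNat := by omega
    have hdigv : Nat.digits 10 (v * 10 + d).toNat = d.toNat :: Nat.digits 10 v.toNat := by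
      rw [htn, Nat.digits_def' (by norm_num : (1:ℕ) < 10) (by omega)]
      have e1 : (v.toNat * 10 + d.toNat) % 10 = d.toNat := by omega
      have e2 : (v.toNat * 10 + d.toNat) / 10 = v.toNat := by omega
      rw [e1, e2]
    refine ⟨by rw [hstep]; exact hge, ?_⟩
    rw [hstep, hdig, hdigv]
    simp only [pvChoose]
    rw [← hd]
    simp

lemma pvChoose_mem : ∀ (k : ℕ) (m a b : ℤ), ∀ d ∈ pvChoose a b m k,
    d = a.toNat ∨ d = b.toNat := by
  intro k
  induction k with
  | zero => intro m a b d hd; simp [pvChoose] at hd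
  | succ k ih =>
    intro m a b d hd
    simp only [pvChoose, List.mem_append, List.mem_singleton] at hd
    rcases hd with hd | hd
    · exact ih _ a b d hd
    · rw [hd]; split_ifs <;> simp

lemma pvChoose_has_b : ∀ (k : ℕ) (m a b : ℤ), 1 ≤ m → m < 2 ^ k →
    b.toNat ∈ pvChoose a b m k := by
  intro k
  induction k with
  | zero => intro m a b h1 h2; norm_num at h2; omega
  | succ k ih =>
    intro m a b h1 h2
    have hmod : PySem.Int.mod m 2 = m % 2 := PySem.Int.mod_eq_emod_of_pos (by norm_num)
    have hdiv : PySem.Int.floordiv m 2 = m / 2 := PySem.Int.floordiv_eq_ediv_of_pos (by norm_num)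
    have hp : (2:ℤ) ^ (k + 1) = 2 * 2 ^ k := by ring
    by_cases he : m % 2 = 1
    · have hone : PySem.Int.mod m 2 = 1 := by rw [hmod]; omega
      simp only [pvChoose, hone]
      simp
    · have he0 : m % 2 = 0 := by omega
      have h1' : 1 ≤ m / 2 := by omega
      have h2' : m / 2 < 2 ^ k := by rw [hp] at h2; omega
      simp only [pvChoose, List.mem_append]
      left
      rw [hdiv]
      exact ih (m / 2) a b h1' h2'

lemma pvChoose_surj : ∀ (k : ℕ) (F : List ℕ) (a b : ℤ), 0 ≤ a → 0 ≤ b →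
    a.toNat ≠ b.toNat → F.length = k → (∀ d ∈ F, d = a.toNat ∨ d = b.toNat) →
    ∃ m : ℤ, 0 ≤ m ∧ m < 2 ^ k ∧ pvChoose a b m k = F ∧ (b.toNat ∈ F → 1 ≤ m) := by
  intro k
  induction k with
  | zero =>
    intro F a b _ _ _ hlen _
    cases F with
    | cons x xs => simp at hlen
    | nil => exact ⟨0, le_rfl, by norm_num, rfl, by simp⟩
  | succ k ih =>
    intro F a b ha hb hab hlen hel
    have hF : F ≠ [] := by intro h; subst h; simp at hlen
    have hsplit : F.dropLast ++ [F.getLast hF] = F := List.dropLast_append_getLast hF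
    have hlen' : F.dropLast.length = k := by simp [List.length_dropLast, hlen]
    have hel' : ∀ d ∈ F.dropLast, d = a.toNat ∨ d = b.toNat := by
      intro d hd
      exact hel d (List.mem_of_mem_dropLast hd)
    obtain ⟨m', hm0, hm2, hmc, hmb⟩ := ih F.dropLast a b ha hb hab hlen' hel'
    have hlast : F.getLast hF = a.toNat ∨ F.getLast hF = b.toNat :=
      hel _ (List.getLast_mem hF)
    have hp : (2:ℤ) ^ (k + 1) = 2 * 2 ^ k := by ring
    by_cases hlb : F.getLast hF = b.toNat
    · refine ⟨2 * m' + 1, by omega, by omega, ?_, fun _ => by omega⟩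
      have hmod : PySem.Int.mod (2 * m' + 1) 2 = 1 := by
        rw [PySem.Int.mod_eq_emod_of_pos (by norm_num)]; omega
      have hdiv : PySem.Int.floordiv (2 * m' + 1) 2 = m' := by
        rw [PySem.Int.floordiv_eq_ediv_of_pos (by norm_num)]; omega
      simp only [pvChoose, hmod, hdiv]
      rw [if_pos (by simp), hmc, ← hlb]
      exact hsplit
    · have hla : F.getLast hF = a.toNat := by tauto
      refine ⟨2 * m', by omega, by omega, ?_, ?_⟩
      · have hmod : PySem.Int.mod (2 * m') 2 = 0 := by
          rw [PySem.Int.mod_eq_emod_of_pos (by norm_num)]; omega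
        have hdiv : PySem.Int.floordiv (2 * m') 2 = m' := by
          rw [PySem.Int.floordiv_eq_ediv_of_pos (by norm_num)]; omega
        simp only [pvChoose, hmod, hdiv]
        rw [if_neg (by simp), hmc, ← hla]
        exact hsplit
      · intro hbF
        rw [← hsplit] at hbF
        simp only [List.mem_append, List.mem_singleton] at hbF
        rcases hbF with hbF | hbF
        · have := hmb hbF; omega
        · rw [hla] at hbF; exact absurd hbF.symm hab

lemma pvBuild_good (k : ℕ) (a b mask : ℤ) (ha : 1 ≤ a) (ha9 : a ≤ 9)
    (hb : 0 ≤ b) (hb9 : b ≤ 9) (hne : b ≠ a) (hm1 : 1 ≤ mask) (hm2 : mask < 2 ^ k) :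
    1 ≤ pvBuild a b a mask k ∧ pvP (pvBuild a b a mask k).toNat := by
  obtain ⟨h1, hdig⟩ := pvBuild_digits k a mask a b ha (by omega) (by omega) ha9 hb hb9
  refine ⟨h1, ?_⟩
  unfold pvP
  rw [hdig]
  have hda : Nat.digits 10 a.toNat = [a.toNat] := digits_single a.toNat (by omega) (by omega)
  rw [hda]
  have hset : (pvChoose a b mask k ++ [a.toNat]).toFinset
      = ({a.toNat, b.toNat} : Finset ℕ) := by
    ext x
    simp only [List.toFinset_append, Finset.mem_union, List.mem_toFinset,
      List.toFinset_cons, List.toFinset_nil, insert_empty_eq, Finset.mem_insert,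
      Finset.mem_singleton]
    constructor
    · rintro (hx | hx)
      · exact pvChoose_mem k mask a b x hx
      · left; exact hx
    · rintro (hx | hx)
      · right; exact hx
      · left; rw [hx]; exact pvChoose_has_b k mask a b hm1 hm2
  rw [hset]
  rw [Finset.card_insert_of_notMem (by simp; omega)]
  simp

-- every number in [10^k, 10^(k+1)) with exactly two distinct digits is built
lemma pvBuild_complete (k : ℕ) (t : ℕ) (hk : 10 ^ k ≤ t) (ht : t < 10 ^ (k + 1))
    (hP : pvP t) :
    ∃ a b mask : ℤ, 1 ≤ a ∧ a < 10 ∧ 0 ≤ b ∧ b < 10 ∧ b ≠ a ∧ 1 ≤ mask ∧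
      mask < 2 ^ k ∧ pvBuild a b a mask k = (t : ℤ) := by
  have ht0 : t ≠ 0 := by
    have : 0 < 10 ^ k := by positivity
    omega
  have hlen : (Nat.digits 10 t).length = k + 1 := by
    rw [Nat.digits_len 10 t (by norm_num) ht0, Nat.log_eq_of_pow_le_of_lt_pow hk ht]
  have hDne : Nat.digits 10 t ≠ [] := by
    intro h; rw [h] at hlen; simp at hlen
  have haN0 : (Nat.digits 10 t).getLast hDne ≠ 0 := Nat.getLast_digit_ne_zero 10 ht0
  have haND : (Nat.digits 10 t).getLast hDne ∈ Nat.digits 10 t := List.getLast_mem hDne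
  have haN10 : (Nat.digits 10 t).getLast hDne < 10 := Nat.digits_lt_base (by norm_num) haND
  set aN := (Nat.digits 10 t).getLast hDne with haN
  unfold pvP at hP
  obtain ⟨x, y, hxy, hxyset⟩ := Finset.card_eq_two.mp hP
  have haNmem : aN ∈ (Nat.digits 10 t).toFinset := List.mem_toFinset.2 haND
  have hexb : ∃ bN, bN ≠ aN ∧ (Nat.digits 10 t).toFinset = {aN, bN} := by
    rw [hxyset] at haNmem
    simp only [Finset.mem_insert, Finset.mem_singleton] at haNmem
    rcases haNmem with rfl | rfl
    · exact ⟨y, fun h => hxy h.symm, hxyset⟩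
    · exact ⟨x, fun h => hxy h, by rw [hxyset, Finset.pair_comm]⟩
  obtain ⟨bN, hbne, hset⟩ := hexb
  have hbmem : bN ∈ Nat.digits 10 t := by
    have : bN ∈ (Nat.digits 10 t).toFinset := by rw [hset]; simp
    exact List.mem_toFinset.1 this
  have hbN10 : bN < 10 := Nat.digits_lt_base (by norm_num) hbmem
  have hFlen : (Nat.digits 10 t).dropLast.length = k := by
    simp [List.length_dropLast, hlen]
  have hFel : ∀ d ∈ (Nat.digits 10 t).dropLast, d = aN ∨ d = bN := by
    intro d hd
    have : d ∈ (Nat.digits 10 t).toFinset :=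
      List.mem_toFinset.2 (List.mem_of_mem_dropLast hd)
    rw [hset] at this
    simpa using this
  obtain ⟨mask, hm0, hm2, hmc, hmb⟩ :=
    pvChoose_surj k (Nat.digits 10 t).dropLast (aN : ℤ) (bN : ℤ) (by positivity)
      (by positivity) (by simpa using fun h => hbne h.symm) hFlen
      (by intro d hd; rcases hFel d hd with h | h <;> simp [h])
  have hbF : bN ∈ (Nat.digits 10 t).dropLast := by
    have hsplit : (Nat.digits 10 t).dropLast ++ [aN] = Nat.digits 10 t :=
      List.dropLast_append_getLast hDne
    have hmem2 : bN ∈ (Nat.digits 10 t).dropLast ++ [aN] := by rw [hsplit]; exact hbmem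
    simp only [List.mem_append, List.mem_singleton] at hmem2
    rcases hmem2 with h | h
    · exact h
    · exact absurd h hbne
  have hm1 : 1 ≤ mask := hmb (by simpa using hbF)
  obtain ⟨hge, hdig⟩ := pvBuild_digits k (aN : ℤ) mask (aN : ℤ) (bN : ℤ)
    (by omega) hm0 (by positivity) (by omega) (by positivity) (by omega)
  have hdigeq : Nat.digits 10 (pvBuild (aN : ℤ) (bN : ℤ) (aN : ℤ) mask k).toNat
      = Nat.digits 10 t := by
    rw [hdig, hmc]
    have e : ((aN : ℤ)).toNat = aN := by omega
    rw [e, digits_single aN (by omega) (by omega)]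
    exact List.dropLast_append_getLast hDne
  have htn : (pvBuild (aN : ℤ) (bN : ℤ) (aN : ℤ) mask k).toNat = t := by
    have h := congrArg (Nat.ofDigits 10) hdigeq
    rwa [Nat.ofDigits_digits, Nat.ofDigits_digits] at h
  exact ⟨(aN : ℤ), (bN : ℤ), mask, by omega, by exact_mod_cast haN10, by positivity,
    by exact_mod_cast hbN10, by exact_mod_cast hbne, hm1, hm2, by omega⟩

-- ---- generic lemmas about the min-folds of B ----

lemma pvFoldl_le_init {f : ℤ → ℤ → ℤ} (h : ∀ acc x, f acc x ≤ acc) :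
    ∀ (l : List ℤ) (init : ℤ), l.foldl f init ≤ init := by
  intro l
  induction l with
  | nil => intro init; simp
  | cons x l ih => intro init; exact le_trans (ih _) (h _ _)

lemma pvFoldl_pres {Q : ℤ → Prop} {f : ℤ → ℤ → ℤ} :
    ∀ (l : List ℤ), (∀ acc x, x ∈ l → f acc x = acc ∨ Q (f acc x)) →
    ∀ init : ℤ, l.foldl f init = init ∨ Q (l.foldl f init) := by
  intro l
  induction l with
  | nil => intro _ init; left; rfl
  | cons x l ih =>
    intro h init
    simp only [List.foldl_cons]
    rcases ih (fun acc z hz => h acc z (List.mem_cons_of_mem _ hz)) (f init x) with heq | hQ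
    · rw [heq]
      exact h init x (by simp)
    · right; exact hQ

lemma pvFoldl_le_of_mem {f : ℤ → ℤ → ℤ} (hmono : ∀ acc x, f acc x ≤ acc) {c x : ℤ}
    (hx : ∀ acc, f acc x ≤ c) :
    ∀ (l : List ℤ) (init : ℤ), x ∈ l → l.foldl f init ≤ c := by
  intro l init hmem
  obtain ⟨l1, l2, rfl⟩ := List.append_of_mem hmem
  rw [List.foldl_append, List.foldl_cons]
  exact le_trans (pvFoldl_le_init hmono l2 _) (hx _)

-- ---- the three nested loops of B ----

def pvRunM (s a b : ℤ) (k : ℕ) (best : ℤ) : ℤ :=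
  (PySem.List.pyRange 1 (2 ^ k) 1).foldl (fun best mask =>
    if s ≤ pvBuild a b a mask k ∧ pvBuild a b a mask k < best
    then pvBuild a b a mask k else best) best

def pvRunB (s a : ℤ) (k : ℕ) (best : ℤ) : ℤ :=
  (PySem.List.pyRange 0 10 1).foldl
    (fun best b => if b ≠ a then pvRunM s a b k best else best) best

def pvRunA (s : ℤ) (k : ℕ) (init : ℤ) : ℤ :=
  (PySem.List.pyRange 1 10 1).foldl (fun best a => pvRunB s a k best) init

lemma pvAlt_eq (n : ℤ) :
    doubleton_alt n = pvRunA (n + 1)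
      ((pvBWidth (n + 1) 1 10 ((n + 1).toNat + 1)).1 - 1).toNat
      (pvBWidth (n + 1) 1 10 ((n + 1).toNat + 1)).2 := by
  rfl

abbrev pvGood (s v : ℤ) : Prop := s ≤ v ∧ 1 ≤ v ∧ pvP v.toNat

lemma pvRunM_le (s a b : ℤ) (k : ℕ) (best : ℤ) : pvRunM s a b k best ≤ best := by
  unfold pvRunM
  apply pvFoldl_le_init
  intro acc x
  dsimp only
  split_ifs with h
  · exact le_of_lt h.2
  · exact le_rfl

lemma pvRunB_le (s a : ℤ) (k : ℕ) (best : ℤ) : pvRunB s a k best ≤ best := by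
  unfold pvRunB
  apply pvFoldl_le_init
  intro acc x
  dsimp only
  split_ifs
  · exact pvRunM_le _ _ _ _ _
  · exact le_rfl

lemma pvRunA_le (s : ℤ) (k : ℕ) (init : ℤ) : pvRunA s k init ≤ init := by
  unfold pvRunA
  apply pvFoldl_le_init
  intro acc x
  exact pvRunB_le _ _ _ _

lemma pvRunM_good (s a b : ℤ) (k : ℕ) (ha : 1 ≤ a) (ha9 : a ≤ 9) (hb : 0 ≤ b)
    (hb9 : b ≤ 9) (hne : b ≠ a) (best : ℤ) :
    pvRunM s a b k best = best ∨ pvGood s (pvRunM s a b k best) := by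
  unfold pvRunM
  apply pvFoldl_pres
  intro acc mask hmem
  rw [PySem.List.mem_pyRange_one] at hmem
  dsimp only
  split_ifs with h
  · right
    obtain ⟨h1, h2⟩ := pvBuild_good k a b mask ha ha9 hb hb9 hne hmem.1 hmem.2
    exact ⟨h.1, h1, h2⟩
  · left; rfl

lemma pvRunB_good (s a : ℤ) (k : ℕ) (ha : 1 ≤ a) (ha9 : a ≤ 9) (best : ℤ) :
    pvRunB s a k best = best ∨ pvGood s (pvRunB s a k best) := by
  unfold pvRunB
  apply pvFoldl_pres
  intro acc b hmem
  rw [PySem.List.mem_pyRange_one] at hmem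
  dsimp only
  split_ifs with h
  · exact pvRunM_good s a b k ha ha9 hmem.1 (by omega) h acc
  · left; rfl

lemma pvRunA_good (s : ℤ) (k : ℕ) (init : ℤ) :
    pvRunA s k init = init ∨ pvGood s (pvRunA s k init) := by
  unfold pvRunA
  apply pvFoldl_pres
  intro acc a hmem
  rw [PySem.List.mem_pyRange_one] at hmem
  exact pvRunB_good s a k hmem.1 (by omega) acc

lemma pvRunM_le_cand (s a b : ℤ) (k : ℕ) (mask : ℤ) (hm1 : 1 ≤ mask)
    (hm2 : mask < 2 ^ k) (hs : s ≤ pvBuild a b a mask k) (best : ℤ) :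
    pvRunM s a b k best ≤ pvBuild a b a mask k := by
  unfold pvRunM
  refine pvFoldl_le_of_mem (x := mask) ?_ ?_ _ _ ?_
  · intro acc z
    dsimp only
    split_ifs with h
    · exact le_of_lt h.2
    · exact le_rfl
  · intro acc
    dsimp only
    split_ifs with h
    · exact le_rfl
    · push_neg at h
      exact h hs
  · rw [PySem.List.mem_pyRange_one]
    exact ⟨hm1, hm2⟩

lemma pvRunB_le_cand (s a b : ℤ) (k : ℕ) (mask : ℤ) (hb : 0 ≤ b) (hb10 : b < 10)
    (hne : b ≠ a) (hm1 : 1 ≤ mask) (hm2 : mask < 2 ^ k)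
    (hs : s ≤ pvBuild a b a mask k) (best : ℤ) :
    pvRunB s a k best ≤ pvBuild a b a mask k := by
  unfold pvRunB
  refine pvFoldl_le_of_mem (x := b) ?_ ?_ _ _ ?_
  · intro acc z
    dsimp only
    split_ifs
    · exact pvRunM_le _ _ _ _ _
    · exact le_rfl
  · intro acc
    dsimp only
    rw [if_pos hne]
    exact pvRunM_le_cand s a b k mask hm1 hm2 hs acc
  · rw [PySem.List.mem_pyRange_one]
    exact ⟨hb, hb10⟩

lemma pvRunA_le_cand (s a b : ℤ) (k : ℕ) (mask : ℤ) (ha : 1 ≤ a) (ha10 : a < 10)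
    (hb : 0 ≤ b) (hb10 : b < 10) (hne : b ≠ a) (hm1 : 1 ≤ mask) (hm2 : mask < 2 ^ k)
    (hs : s ≤ pvBuild a b a mask k) (init : ℤ) :
    pvRunA s k init ≤ pvBuild a b a mask k := by
  unfold pvRunA
  refine pvFoldl_le_of_mem (x := a) ?_ ?_ _ _ ?_
  · intro acc z
    exact pvRunB_le _ _ _ _
  · intro acc
    exact pvRunB_le_cand s a b k mask hb hb10 hne hm1 hm2 hs acc
  · rw [PySem.List.mem_pyRange_one]
    exact ⟨ha, ha10⟩

-- ---- characterisation of B: the least m ≥ n+1 with exactly two distinct digits ----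

lemma pvAlt_char (n : ℤ) (hn : -1 ≤ n) :
    (n + 1) ≤ doubleton_alt n ∧ 1 ≤ doubleton_alt n ∧ pvP (doubleton_alt n).toNat ∧
      (∀ t : ℕ, (n + 1) ≤ (t : ℤ) → pvP t → doubleton_alt n ≤ (t : ℤ)) ∧
      doubleton_alt n ≤ 10 * (n + 1) + 10 := by
  set s := n + 1 with hs
  have hs0 : 0 ≤ s := by omega
  have hsfuel : s < 10 ^ ((1:ℤ).toNat + (s.toNat + 1)) := by
    have h1 : s.toNat < 10 ^ s.toNat := Nat.lt_pow_self (by norm_num)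
    have h2 : (10:ℕ) ^ s.toNat ≤ 10 ^ ((1:ℤ).toNat + (s.toNat + 1)) :=
      Nat.pow_le_pow_right (by norm_num) (by omega)
    have h3 : s.toNat < 10 ^ ((1:ℤ).toNat + (s.toNat + 1)) := lt_of_lt_of_le h1 h2
    have hcast : (((10:ℕ) ^ ((1:ℤ).toNat + (s.toNat + 1)) : ℕ) : ℤ)
        = (10:ℤ) ^ ((1:ℤ).toNat + (s.toNat + 1)) := by push_cast; ring
    omega
  obtain ⟨W, hrun, hW1, hWlt, hWlow⟩ := pvBWidth_char (s.toNat + 1) s 1 (by norm_num) hsfuel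
  have e10 : ((10:ℤ) ^ ((1:ℤ)).toNat) = 10 := by norm_num
  rw [e10] at hrun
  set k := (W - 1).toNat with hk
  have hWk : W.toNat = k + 1 := by omega
  have halt : doubleton_alt n = pvRunA s k ((10:ℤ) ^ (k + 1)) := by
    rw [pvAlt_eq, ← hs, hrun]
    show pvRunA s ((W - 1).toNat) ((10:ℤ) ^ W.toNat) = pvRunA s k ((10:ℤ) ^ (k + 1))
    rw [← hk, hWk]
  have hlimpos : (1:ℤ) ≤ 10 ^ (k + 1) := by
    have := pow_pos (show (0:ℤ) < 10 by norm_num) (k + 1)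
    omega
  have hlimP : pvP ((10:ℤ) ^ (k + 1)).toNat := by
    have hcast : ((10:ℤ) ^ (k + 1)) = ((10 ^ (k + 1) : ℕ) : ℤ) := by push_cast; ring
    rw [hcast, Int.toNat_natCast]
    exact pvP_pow10 (k + 1) (by omega)
  rw [hWk] at hWlt
  have hslim : s ≤ 10 ^ (k + 1) := le_of_lt hWlt
  have hgood : pvGood s (doubleton_alt n) := by
    rw [halt]
    rcases pvRunA_good s k ((10:ℤ) ^ (k + 1)) with heq | hg
    · rw [heq]
      exact ⟨hslim, hlimpos, hlimP⟩
    · exact hg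
  obtain ⟨hg1, hg2, hg3⟩ := hgood
  refine ⟨hg1, hg2, hg3, ?_, ?_⟩
  · intro t hts htP
    by_cases hcase : (t : ℤ) < 10 ^ (k + 1)
    · rcases Nat.eq_zero_or_pos k with hk0 | hkpos
      · exfalso
        rw [hk0] at hcase
        norm_num at hcase
        exact pvP_small t (by omega) htP
      · have hklow : (10:ℤ) ^ k ≤ s := by
          rcases hWlow with hW1' | hlow
          · omega
          · rw [hWk] at hlow
            simpa using hlow
        have hcast1 : ((10 ^ k : ℕ) : ℤ) = (10:ℤ) ^ k := by push_cast; ring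
        have hcast2 : ((10 ^ (k + 1) : ℕ) : ℤ) = (10:ℤ) ^ (k + 1) := by push_cast; ring
        have hkt : 10 ^ k ≤ t := by
          have := le_trans hklow hts
          omega
        have hkt2 : t < 10 ^ (k + 1) := by omega
        obtain ⟨a, b, mask, ha, ha10, hb, hb10, hne, hm1, hm2, hbuild⟩ :=
          pvBuild_complete k t hkt hkt2 htP
        rw [halt, ← hbuild]
        exact pvRunA_le_cand s a b k mask ha ha10 hb hb10 hne hm1 hm2
          (by rw [hbuild]; exact hts) _
    · rw [halt]
      calc pvRunA s k ((10:ℤ) ^ (k + 1)) ≤ (10:ℤ) ^ (k + 1) := pvRunA_le _ _ _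
        _ ≤ (t : ℤ) := by omega
  · have hle10 : doubleton_alt n ≤ 10 ^ (k + 1) := by
      rw [halt]; exact pvRunA_le _ _ _
    rcases Nat.eq_zero_or_pos k with hk0 | hkpos
    · rw [hk0] at hle10
      norm_num at hle10
      omega
    · have hklow : (10:ℤ) ^ k ≤ s := by
        rcases hWlow with hW1' | hlow
        · omega
        · rw [hWk] at hlow
          simpa using hlow
      have he : (10:ℤ) ^ (k + 1) = 10 * 10 ^ k := by ring
      omega

-- ===== VERDICT (by name: the statement is the Claim_ definition above) =====
theorem doubleton_spec : Claim_equal_doubleton := by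
  intro n _ hpre
  unfold Pre_doubleton at hpre
  unfold Spec_doubleton
  obtain ⟨hg1, hg2, hg3, hmin, hbound⟩ := pvAlt_char n hpre
  have h0 : 0 ≤ n + 1 := by omega
  have htn : (((doubleton_alt n).toNat : ℤ)) = doubleton_alt n :=
    Int.toNat_of_nonneg (by omega)
  have hmain := pvAOuter_eq (10 * (n + 1) + 11).toNat (n + 1) (doubleton_alt n).toNat h0
    (by omega) hg3
    (by
      intro t ht1 ht2 htP
      have hts : (n + 1) ≤ (t : ℤ) := by omega
      have := hmin t hts htP
      omega)
    (by omega)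
  unfold doubleton
  rw [hmain, htn]
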